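-- pv_equiv track=rewrite | github.com/lukantozi/uni | alg_dat/bubble_sort/bubble_sort.py | is_stable_after_bubble
-- ===== SOURCE A (Python) =====
-- def is_stable_after_bubble(arr):
--     n = len(arr)
--     indices = []
--     for i in range(n):
--         indices.append(i)
--     for i in range(n):
--         swapped = False
--         for j in range(0, n - i -1):
--             if arr[j] > arr[j+1]:
--                 arr[j], arr[j+1] = arr[j+1], arr[j]
--                 indices[j], indices[j+1] = indices[j+1], indices[j]
--                 swapped = True
--         if not swapped:
--             break
--     return arr, indices
-- ===== SOURCE B (Python) =====
-- def is_stable_after_bubble(arr):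
--     # Insertion sort over (value, original index) pairs; mutates arr in place like A.
--     pairs = []
--     for i, v in enumerate(arr):
--         k = 0
--         while k < len(pairs) and pairs[k][0] <= v:
--             k += 1
--         pairs.insert(k, (v, i))
--     arr[:] = [v for v, _ in pairs]
--     return arr, [i for _, i in pairs]
-- ===== Notes on version B (the rewrite author's own statement) =====
-- stated objective: alternative
-- what changed: Replaces the early-exit bubble sort over two parallel lists by a single-pass stable insertion sort over (value, original-index) pairs, from which the sorted values and the index permutation are read off.
import Mathlib
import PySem

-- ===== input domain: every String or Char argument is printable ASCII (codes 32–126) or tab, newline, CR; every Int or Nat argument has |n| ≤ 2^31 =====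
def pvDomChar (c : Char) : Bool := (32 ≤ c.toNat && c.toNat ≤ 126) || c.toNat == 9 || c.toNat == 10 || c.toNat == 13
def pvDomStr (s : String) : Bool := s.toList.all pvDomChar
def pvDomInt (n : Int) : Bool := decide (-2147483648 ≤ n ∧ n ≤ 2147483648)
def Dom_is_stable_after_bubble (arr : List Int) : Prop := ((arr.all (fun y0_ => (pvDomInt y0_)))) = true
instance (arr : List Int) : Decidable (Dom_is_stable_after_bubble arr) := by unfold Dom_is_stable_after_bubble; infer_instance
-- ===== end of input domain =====

-- B replaces A's bubble sort by a stable insertion sort over (value, original-index)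
-- pairs (objective: alternative).  Both Pythons mutate/return the caller's list object;
-- the equivalence proved here is about the RETURN value.

-- ===== PORT A =====
-- inner loop 'for j in range(0, n-i-1)': one compare-and-swap pass over the two
-- parallel lists, m = number of comparisons left; returns (arr, indices, swapped)
def pvPassA : Nat → List Int → List Int → List Int × List Int × Bool
  | 0, a, ind => (a, ind, false)
  | m+1, x :: y :: ta, p :: q :: ti =>
      if x > y then
        let r := pvPassA m (x :: ta) (p :: ti)
        (y :: r.1, q :: r.2.1, true)
      else
        let r := pvPassA m (y :: ta) (q :: ti)
        (x :: r.1, p :: r.2.1, r.2.2)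
  | _+1, a, ind => (a, ind, false)   -- unreachable: Python's j stays in range

-- outer loop 'for i in range(n)' with the break; fuel k = n - i
def pvOuterA : Nat → List Int → List Int → List Int × List Int
  | 0, a, ind => (a, ind)
  | k+1, a, ind =>
      let r := pvPassA k a ind
      if r.2.2 then pvOuterA k r.1 r.2.1 else (r.1, r.2.1)

def is_stable_after_bubble (arr : List Int) : List Int × List Int :=
  let n : Int := (arr.length : Int)
  let indices := (PySem.List.pyRange 0 n 1).foldl (fun acc i => acc ++ [i]) []
  pvOuterA arr.length arr indices

-- ===== PORT B =====
-- the while loop 'k = 0; while k < len(pairs) and pairs[k][0] <= v: k += 1'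
def pvFindK (v : Int) : List (Int × Int) → Nat
  | [] => 0
  | (w, _) :: t => if w ≤ v then pvFindK v t + 1 else 0

def is_stable_after_bubble_alt (arr : List Int) : List Int × List Int :=
  let pairs := (PySem.List.enumerate arr 0).foldl
    (fun ps iv => PySem.List.insert ps ((pvFindK iv.2 ps : Nat) : Int) (iv.2, iv.1)) []
  (pairs.map (fun p => p.1), pairs.map (fun p => p.2))

-- ===== PRECONDITION & SPEC =====
def Spec_is_stable_after_bubble (arr : List Int) (out : List Int × List Int) : Prop := out = is_stable_after_bubble_alt arr
instance (arr : List Int) (out : List Int × List Int) : Decidable (Spec_is_stable_after_bubble arr out) := by unfold Spec_is_stable_after_bubble; infer_instance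

-- ===== CLAIM (what is proved, stated in full; the proofs are below) =====
def Claim_equal_is_stable_after_bubble : Prop := ∀ (arr : List Int), Dom_is_stable_after_bubble arr → Spec_is_stable_after_bubble arr (is_stable_after_bubble arr)


-- ===== LEMMAS AND PROOFS =====

-- value order, strict lexicographic (value, index) order, and the stability relation
def pvVle (a b : Int × Int) : Prop := a.1 ≤ b.1
def pvLlt (a b : Int × Int) : Prop := a.1 < b.1 ∨ (a.1 = b.1 ∧ a.2 < b.2)
def pvStb (a b : Int × Int) : Prop := a.1 = b.1 → a.2 < b.2

-- A's pass/outer loop replayed on the zipped (value, index) pairs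
def pvPassP : Nat → List (Int × Int) → List (Int × Int) × Bool
  | 0, l => (l, false)
  | m+1, a :: b :: t =>
      if a.1 > b.1 then
        let r := pvPassP m (a :: t)
        (b :: r.1, true)
      else
        let r := pvPassP m (b :: t)
        (a :: r.1, r.2)
  | _+1, l => (l, false)

def pvOuterP : Nat → List (Int × Int) → List (Int × Int)
  | 0, l => l
  | k+1, l =>
      let r := pvPassP k l
      if r.2 then pvOuterP k r.1 else r.1

-- B's insert replayed structurally
def pvIns (v i : Int) : List (Int × Int) → List (Int × Int)
  | [] => [(v, i)]
  | (w, j) :: t => if w ≤ v then (w, j) :: pvIns v i t else (v, i) :: (w, j) :: t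

-- enumeration of arr as (value, index) pairs starting at s
def pvEnum : Int → List Int → List (Int × Int)
  | _, [] => []
  | s, x :: t => (x, s) :: pvEnum (s+1) t

theorem pvFoldl_append : ∀ (l init : List Int), l.foldl (fun acc x => acc ++ [x]) init = init ++ l := by
  intro l
  induction l with
  | nil => simp
  | cons x t ih => intro init; simp [List.foldl_cons, ih]

theorem pvZipMap (l : List (Int × Int)) : (l.map Prod.fst).zip (l.map Prod.snd) = l := by
  induction l with
  | nil => rfl
  | cons a t ih => simp [ih]

theorem pvPassA_zip : ∀ (m : Nat) (a ind : List Int), a.length = ind.length →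
    pvPassA m a ind = (((pvPassP m (a.zip ind)).1.map Prod.fst),
      ((pvPassP m (a.zip ind)).1.map Prod.snd), (pvPassP m (a.zip ind)).2) := by
  intro m
  induction m with
  | zero => intro a ind h; simp [pvPassA, pvPassP, List.map_fst_zip, List.map_snd_zip, h.le, h.ge]
  | succ m ih =>
    intro a ind h
    match a, ind with
    | [], ind =>
      have : ind = [] := by simpa using h.symm
      subst this; simp [pvPassA, pvPassP]
    | [x], ind =>
      match ind with
      | [p] => simp [pvPassA, pvPassP]
    | x :: y :: ta, ind =>
      match ind with
      | p :: q :: ti =>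
        have hlen : (x :: ta).length = (p :: ti).length := by simpa using h
        have hlen' : (y :: ta).length = (q :: ti).length := by simpa using h
        by_cases hxy : x > y
        · simp only [pvPassA, pvPassP, List.zip_cons_cons, if_pos hxy, ih _ _ hlen]
          simp
        · simp only [pvPassA, pvPassP, List.zip_cons_cons, if_neg hxy, ih _ _ hlen']
          simp

theorem pvPassP_perm (m : Nat) (l : List (Int × Int)) : (pvPassP m l).1.Perm l := by
  induction m generalizing l with
  | zero => simp [pvPassP]
  | succ m ih =>
    match l with
    | [] => simp [pvPassP]
    | [a] => simp [pvPassP]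
    | a :: b :: t =>
      by_cases hab : a.1 > b.1
      · simp only [pvPassP, if_pos hab]
        exact ((ih (a :: t)).cons b).trans (List.Perm.swap a b t)
      · simp only [pvPassP, if_neg hab]
        exact (ih (b :: t)).cons a

theorem pvPassP_length (m : Nat) (l : List (Int × Int)) : (pvPassP m l).1.length = l.length :=
  (pvPassP_perm m l).length_eq

theorem pvOuterA_zip : ∀ (k : Nat) (a ind : List Int), a.length = ind.length →
    pvOuterA k a ind = (((pvOuterP k (a.zip ind)).map Prod.fst), ((pvOuterP k (a.zip ind)).map Prod.snd)) := by
  intro k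
  induction k with
  | zero => intro a ind h; simp [pvOuterA, pvOuterP, List.map_fst_zip, List.map_snd_zip, h.le, h.ge]
  | succ k ih =>
    intro a ind h
    simp only [pvOuterA, pvOuterP, pvPassA_zip k a ind h]
    by_cases hsw : (pvPassP k (a.zip ind)).2
    · simp only [hsw, if_true]
      rw [ih _ _ (by simp), pvZipMap]
    · simp [hsw]

theorem pvPassP_stb (m : Nat) (l : List (Int × Int)) (h : l.Pairwise pvStb) :
    (pvPassP m l).1.Pairwise pvStb := by
  induction m generalizing l with
  | zero => simpa [pvPassP] using h
  | succ m ih =>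
    match l with
    | [] => simp [pvPassP]
    | [a] => simpa [pvPassP] using h
    | a :: b :: t =>
      rcases List.pairwise_cons.1 h with ⟨hahd, h2⟩
      rcases List.pairwise_cons.1 h2 with ⟨hbhd, ht⟩
      by_cases hab : a.1 > b.1
      · simp only [pvPassP, if_pos hab]
        refine List.pairwise_cons.2 ⟨?_, ih (a :: t) (List.pairwise_cons.2 ⟨fun x hx => hahd x (by simp [hx]), ht⟩)⟩
        intro x hx
        rcases List.mem_cons.1 ((pvPassP_perm m (a :: t)).mem_iff.1 hx) with rfl | hx'
        · intro hba; exfalso; omega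
        · exact hbhd x hx'
      · simp only [pvPassP, if_neg hab]
        refine List.pairwise_cons.2 ⟨?_, ih (b :: t) (List.pairwise_cons.2 ⟨hbhd, ht⟩)⟩
        intro x hx
        rcases List.mem_cons.1 ((pvPassP_perm m (b :: t)).mem_iff.1 hx) with rfl | hx'
        · exact hahd x (by simp)
        · exact hahd x (by simp [hx'])

theorem pvPassP_false (m : Nat) (l : List (Int × Int)) (h : (pvPassP m l).2 = false) :
    (pvPassP m l).1 = l ∧ List.IsChain pvVle (l.take (m+1)) := by
  induction m generalizing l with
  | zero =>
    refine ⟨rfl, ?_⟩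
    match l with
    | [] => exact List.IsChain.nil
    | a :: t => simpa using List.IsChain.singleton a
  | succ m ih =>
    match l with
    | [] => exact ⟨rfl, List.IsChain.nil⟩
    | [a] => exact ⟨rfl, by simpa using List.IsChain.singleton a⟩
    | a :: b :: t =>
      by_cases hab : a.1 > b.1
      · simp only [pvPassP, if_pos hab] at h
        exact Bool.noConfusion h
      · simp only [pvPassP, if_neg hab] at h ⊢
        rcases ih (b :: t) h with ⟨heq, hch⟩
        refine ⟨by rw [heq], ?_⟩
        have hab' : pvVle a b := by unfold pvVle; omega
        simp only [List.take_succ_cons] at hch ⊢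
        exact List.IsChain.cons_cons hab' hch

theorem pvPassP_spec (m : Nat) (l : List (Int × Int)) (h : m + 1 ≤ l.length) :
    ∃ pre x, (pvPassP m l).1 = pre ++ x :: l.drop (m+1) ∧ pre.length = m ∧
      (pre ++ [x]).Perm (l.take (m+1)) ∧ ∀ y ∈ pre, y.1 ≤ x.1 := by
  induction m generalizing l with
  | zero =>
    match l with
    | c :: t => exact ⟨[], c, by simp [pvPassP], rfl, by simp, by simp⟩
  | succ m ih =>
    match l with
    | [] => simp at h
    | [c] => simp at h
    | a :: b :: t =>
      have hlen : m + 1 ≤ (a :: t).length := by simpa using h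
      have hlen' : m + 1 ≤ (b :: t).length := by simpa using h
      by_cases hab : a.1 > b.1
      · rcases ih (a :: t) hlen with ⟨pre, x, he, hl, hp, hm⟩
        have hax : a.1 ≤ x.1 := by
          have hmem0 : a ∈ pre ++ [x] := hp.mem_iff.2 (by simp [List.take_succ_cons])
          rcases List.mem_append.1 hmem0 with hmem | hmem
          · exact hm a hmem
          · simp only [List.mem_singleton] at hmem; rw [hmem]
        refine ⟨b :: pre, x, ?_, by simp [hl], ?_, ?_⟩
        · simp only [pvPassP, if_pos hab]
          simpa [List.drop_succ_cons] using congrArg (b :: ·) he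
        · have h1 : (b :: (pre ++ [x])).Perm (b :: a :: t.take m) := by
            have := hp.cons b
            simpa [List.take_succ_cons] using this
          have h2 : (b :: a :: t.take m).Perm (a :: b :: t.take m) := List.Perm.swap a b _
          simpa [List.take_succ_cons] using h1.trans h2
        · intro y hy
          rcases List.mem_cons.1 hy with rfl | hy'
          · omega
          · exact hm y hy'
      · rcases ih (b :: t) hlen' with ⟨pre, x, he, hl, hp, hm⟩
        have hbx : b.1 ≤ x.1 := by
          have hmem0 : b ∈ pre ++ [x] := hp.mem_iff.2 (by simp [List.take_succ_cons])
          rcases List.mem_append.1 hmem0 with hmem | hmem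
          · exact hm b hmem
          · simp only [List.mem_singleton] at hmem; rw [hmem]
        refine ⟨a :: pre, x, ?_, by simp [hl], ?_, ?_⟩
        · simp only [pvPassP, if_neg hab]
          simpa [List.drop_succ_cons] using congrArg (a :: ·) he
        · have h1 : (a :: (pre ++ [x])).Perm (a :: b :: t.take m) := by
            have := hp.cons a
            simpa [List.take_succ_cons] using this
          simpa [List.take_succ_cons] using h1
        · intro y hy
          rcases List.mem_cons.1 hy with rfl | hy'
          · omega
          · exact hm y hy'

theorem pvOuterP_sorted : ∀ (k : Nat) (l : List (Int × Int)), k ≤ l.length →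
    (∀ x ∈ l.take k, ∀ y ∈ l.drop k, pvVle x y) → (l.drop k).Pairwise pvVle →
    (pvOuterP k l).Perm l ∧ (pvOuterP k l).Pairwise pvVle := by
  intro k
  induction k with
  | zero => intro l _ _ hpw; exact ⟨List.Perm.refl l, by simpa using hpw⟩
  | succ k ih =>
    intro l hk hsep hpw
    by_cases hsw : (pvPassP k l).2
    · rcases pvPassP_spec k l hk with ⟨pre, x, he, hl, hp, hm⟩
      have hxmem : x ∈ l.take (k+1) := hp.mem_iff.1 (by simp)
      have hpre_mem : ∀ a ∈ pre, a ∈ l.take (k+1) := fun a ha => hp.mem_iff.1 (by simp [ha])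
      have htk : (pvPassP k l).1.take k = pre := by rw [he, ← hl]; exact List.take_left
      have hdk : (pvPassP k l).1.drop k = x :: l.drop (k+1) := by rw [he, ← hl]; exact List.drop_left
      have hklen : k ≤ (pvPassP k l).1.length := by rw [pvPassP_length]; omega
      have ihres := ih (pvPassP k l).1 hklen ?_ ?_
      · simp only [pvOuterP, hsw, if_true]
        exact ⟨ihres.1.trans (pvPassP_perm k l), ihres.2⟩
      · intro a ha y hy
        rw [htk] at ha
        rw [hdk] at hy
        rcases List.mem_cons.1 hy with rfl | hy'
        · exact hm a ha
        · exact hsep a (hpre_mem a ha) y hy'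
      · rw [hdk]
        exact List.pairwise_cons.2 ⟨fun y hy => hsep x hxmem y hy, hpw⟩
    · have hfalse : (pvPassP k l).2 = false := by simpa using hsw
      rcases pvPassP_false k l hfalse with ⟨heq, hch⟩
      simp only [pvOuterP, hsw, if_false, heq]
      refine ⟨List.Perm.refl l, ?_⟩
      have hpw_take : (l.take (k+1)).Pairwise pvVle := by
        rw [← @List.isChain_iff_pairwise _ pvVle _ ⟨fun h1 h2 => le_trans h1 h2⟩]
        exact hch
      have : l = l.take (k+1) ++ l.drop (k+1) := (List.take_append_drop (k+1) l).symm
      rw [this]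
      exact List.pairwise_append.2 ⟨hpw_take, hpw, fun a ha b hb => hsep a ha b hb⟩

theorem pvOuterP_stb : ∀ (k : Nat) (l : List (Int × Int)), l.Pairwise pvStb →
    (pvOuterP k l).Pairwise pvStb := by
  intro k
  induction k with
  | zero => intro l h; simpa [pvOuterP] using h
  | succ k ih =>
    intro l h
    by_cases hsw : (pvPassP k l).2
    · simp only [pvOuterP, hsw, if_true]
      exact ih _ (pvPassP_stb k l h)
    · simp only [pvOuterP, hsw, if_false]
      exact pvPassP_stb k l h

theorem pvFindK_le (v : Int) : ∀ l : List (Int × Int), pvFindK v l ≤ l.length := by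
  intro l
  induction l with
  | nil => simp [pvFindK]
  | cons p t ih =>
    obtain ⟨w, j⟩ := p
    by_cases hw : w ≤ v
    · simp only [pvFindK, if_pos hw, List.length_cons]; omega
    · simp [pvFindK, if_neg hw]

theorem pvIns_take_drop (v i : Int) : ∀ l : List (Int × Int),
    pvIns v i l = l.take (pvFindK v l) ++ (v, i) :: l.drop (pvFindK v l) := by
  intro l
  induction l with
  | nil => simp [pvIns, pvFindK]
  | cons p t ih =>
    obtain ⟨w, j⟩ := p
    by_cases hw : w ≤ v
    · simp only [pvIns, pvFindK, if_pos hw, List.take_succ_cons, List.drop_succ_cons, List.cons_append, ih]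
    · simp [pvIns, pvFindK, if_neg hw]

theorem pvIns_eq_insert (l : List (Int × Int)) (v i : Int) :
    PySem.List.insert l ((pvFindK v l : Nat) : Int) (v, i) = pvIns v i l := by
  rw [PySem.List.insert_natCast l (pvFindK v l) (v, i) (pvFindK_le v l), pvIns_take_drop]

theorem pvIns_perm (v i : Int) (l : List (Int × Int)) : (pvIns v i l).Perm ((v, i) :: l) := by
  induction l with
  | nil => simp [pvIns]
  | cons p t ih =>
    obtain ⟨w, j⟩ := p
    by_cases hw : w ≤ v
    · simp only [pvIns, if_pos hw]
      exact (ih.cons (w, j)).trans (List.Perm.swap (v, i) (w, j) t)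
    · simp [pvIns, if_neg hw]

theorem pvIns_sorted (v i : Int) : ∀ l : List (Int × Int), l.Pairwise pvLlt →
    (∀ p ∈ l, p.2 < i) → (pvIns v i l).Pairwise pvLlt := by
  intro l
  induction l with
  | nil => intro _ _; simp [pvIns, pvLlt]
  | cons p t ih =>
    intro h hi
    obtain ⟨w, j⟩ := p
    rcases List.pairwise_cons.1 h with ⟨hhd, ht⟩
    by_cases hw : w ≤ v
    · simp only [pvIns, if_pos hw]
      refine List.pairwise_cons.2 ⟨?_, ih ht (fun p hp => hi p (by simp [hp]))⟩
      intro x hx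
      rcases List.mem_cons.1 ((pvIns_perm v i t).mem_iff.1 hx) with rfl | hx'
      · rcases lt_or_eq_of_le hw with hlt | heq
        · exact Or.inl hlt
        · exact Or.inr ⟨heq, hi (w, j) (by simp)⟩
      · exact hhd x hx'
    · simp only [pvIns, if_neg hw]
      have hw' : v < w := lt_of_not_ge hw
      refine List.pairwise_cons.2 ⟨?_, h⟩
      intro x hx
      rcases List.mem_cons.1 hx with rfl | hx'
      · exact Or.inl hw'
      · have := hhd x hx'
        unfold pvLlt at this ⊢
        omega

theorem pvFoldB : ∀ (l : List Int) (s : Int) (acc : List (Int × Int)),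
    acc.Pairwise pvLlt → (∀ p ∈ acc, p.2 < s) →
    ((PySem.List.enumerate l s).foldl (fun ps iv => pvIns iv.2 iv.1 ps) acc).Pairwise pvLlt ∧
    ((PySem.List.enumerate l s).foldl (fun ps iv => pvIns iv.2 iv.1 ps) acc).Perm (acc ++ pvEnum s l) := by
  intro l
  induction l with
  | nil => intro s acc h hi; simp [PySem.List.enumerate_nil, pvEnum, h]
  | cons x t ih =>
    intro s acc h hi
    rw [PySem.List.enumerate_cons]
    simp only [List.foldl_cons]
    have hacc' : (pvIns x s acc).Pairwise pvLlt := pvIns_sorted x s acc h hi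
    have hidx' : ∀ p ∈ pvIns x s acc, p.2 < s + 1 := by
      intro p hp
      rcases List.mem_cons.1 ((pvIns_perm x s acc).mem_iff.1 hp) with rfl | hp'
      · omega
      · have := hi p hp'; omega
    rcases ih (s + 1) (pvIns x s acc) hacc' hidx' with ⟨h1, h2⟩
    refine ⟨h1, h2.trans ?_⟩
    have p1 : (pvIns x s acc ++ pvEnum (s+1) t).Perm (((x, s) :: acc) ++ pvEnum (s+1) t) :=
      (pvIns_perm x s acc).append_right _
    have p3 : ((x, s) :: (acc ++ pvEnum (s+1) t)).Perm (acc ++ (x, s) :: pvEnum (s+1) t) :=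
      List.perm_middle.symm
    have hfin : pvEnum s (x :: t) = (x, s) :: pvEnum (s+1) t := rfl
    rw [hfin]
    exact p1.trans p3

theorem pvEnum_length : ∀ (l : List Int) (s : Int), (pvEnum s l).length = l.length := by
  intro l
  induction l with
  | nil => intro s; rfl
  | cons x t ih => intro s; simp [pvEnum, ih]

theorem pvEnum_zip : ∀ (l : List Int) (s : Int),
    l.zip (PySem.List.pyRange s (s + l.length) 1) = pvEnum s l := by
  intro l
  induction l with
  | nil => intro s; simp [pvEnum]
  | cons x t ih =>
    intro s
    have hcons : PySem.List.pyRange s (s + (x :: t).length) 1 = s :: PySem.List.pyRange (s + 1) (s + (x :: t).length) 1 := by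
      apply PySem.List.pyRange_one_cons
      simp only [List.length_cons]
      push_cast
      omega
    rw [hcons]
    have harg : s + ((x :: t).length : Int) = (s + 1) + (t.length : Int) := by
      simp only [List.length_cons]; push_cast; ring
    rw [List.zip_cons_cons, harg, ih (s + 1)]
    rfl

theorem pvEnum_idx : ∀ (l : List Int) (s : Int), ∀ p ∈ pvEnum s l, s ≤ p.2 := by
  intro l
  induction l with
  | nil => intro s p hp; simp [pvEnum] at hp
  | cons x t ih =>
    intro s p hp
    rcases List.mem_cons.1 hp with rfl | hp'
    · simp
    · have := ih (s + 1) p hp'; omega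

theorem pvEnum_stb : ∀ (l : List Int) (s : Int), (pvEnum s l).Pairwise pvStb := by
  intro l
  induction l with
  | nil => intro s; simp [pvEnum]
  | cons x t ih =>
    intro s
    refine List.pairwise_cons.2 ⟨?_, ih (s + 1)⟩
    intro p hp _
    have := pvEnum_idx t (s + 1) p hp
    simp only
    omega

theorem pvUnique (l1 l2 : List (Int × Int)) (hp : l1.Perm l2)
    (h1 : l1.Pairwise pvLlt) (h2 : l2.Pairwise pvLlt) : l1 = l2 := by
  refine List.Perm.eq_of_pairwise ?_ h1 h2 hp
  intro a b _ _ hab hba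
  exfalso
  rcases hab with h | ⟨h, h'⟩ <;> rcases hba with g | ⟨g, g'⟩ <;> omega

-- ===== VERDICT (by name: the statement is the Claim_ definition above) =====
theorem is_stable_after_bubble_spec : Claim_equal_is_stable_after_bubble := by
  intro arr _
  unfold Spec_is_stable_after_bubble
  show pvOuterA arr.length arr
      ((PySem.List.pyRange 0 ((arr.length : Int)) 1).foldl (fun acc i => acc ++ [i]) [])
    = (((PySem.List.enumerate arr 0).foldl
        (fun ps iv => PySem.List.insert ps ((pvFindK iv.2 ps : Nat) : Int) (iv.2, iv.1)) []).map (fun p => p.1),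
       ((PySem.List.enumerate arr 0).foldl
        (fun ps iv => PySem.List.insert ps ((pvFindK iv.2 ps : Nat) : Int) (iv.2, iv.1)) []).map (fun p => p.2))
  have hidx : (PySem.List.pyRange 0 ((arr.length : Int)) 1).foldl (fun acc i => acc ++ [i]) ([] : List Int)
      = PySem.List.pyRange 0 ((arr.length : Int)) 1 := by
    rw [pvFoldl_append]; simp
  have hlen : (PySem.List.pyRange 0 ((arr.length : Int)) 1).length = arr.length := by
    rw [PySem.List.length_pyRange_one]; simp
  have hzip : arr.zip (PySem.List.pyRange 0 ((arr.length : Int)) 1) = pvEnum 0 arr := by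
    have := pvEnum_zip arr 0
    simpa using this
  rw [hidx, pvOuterA_zip arr.length arr _ (by rw [hlen]), hzip]
  -- A's result on pairs
  have hlen0 : (pvEnum 0 arr).length = arr.length := pvEnum_length arr 0
  have hA := pvOuterP_sorted arr.length (pvEnum 0 arr) (by omega)
    (by intro x hx y hy
        rw [List.drop_of_length_le (by omega)] at hy
        simp at hy)
    (by rw [List.drop_of_length_le (by omega)]; exact List.Pairwise.nil)
  have hAstb := pvOuterP_stb arr.length (pvEnum 0 arr) (pvEnum_stb arr 0)
  have hAllt : (pvOuterP arr.length (pvEnum 0 arr)).Pairwise pvLlt := by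
    refine (hA.2.and hAstb).imp ?_
    rintro a b ⟨hle, hstb⟩
    rcases lt_or_eq_of_le hle with hlt | heq
    · exact Or.inl hlt
    · exact Or.inr ⟨heq, hstb heq⟩
  -- B's result on pairs
  simp only [pvIns_eq_insert]
  have hB := pvFoldB arr 0 [] List.Pairwise.nil (by simp)
  have hBperm : ((PySem.List.enumerate arr 0).foldl (fun ps iv => pvIns iv.2 iv.1 ps) []).Perm (pvEnum 0 arr) := by
    simpa using hB.2
  have hRS : pvOuterP arr.length (pvEnum 0 arr)
      = (PySem.List.enumerate arr 0).foldl (fun ps iv => pvIns iv.2 iv.1 ps) [] :=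
    pvUnique _ _ (hA.1.trans hBperm.symm) hAllt hB.1
  rw [hRS]
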